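-- pv_equiv track=rewrite | github.com/s-nosonov-chernomor/andromeda_SMART | app/services/modbus_line.py | _split_ranges
-- ===== SOURCE A (Python) =====
-- from typing import Dict, List, Optional, Tuple, Any
--
-- def _split_ranges(addrs: List[int], max_len: int) -> List[Tuple[int, int]]:
--     if not addrs:
--         return []
--     addrs = sorted(addrs)
--     out: List[Tuple[int, int]] = []
--     s = addrs[0]
--     prev = s
--     for a in addrs[1:]:
--         if a == prev + 1 and (a - s + 1) <= max_len:
--             prev = a
--         else:
--             out.append((s, prev))
--             s = a
--             prev = a
--     out.append((s, prev))
--     return out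
-- ===== SOURCE B (Python) =====
-- def _split_ranges(addrs, max_len):
--     xs = sorted(addrs)
--     if not xs:
--         return []
--     # pass 1: maximal runs of consecutive integers
--     runs = []
--     s = prev = xs[0]
--     for a in xs[1:]:
--         if a == prev + 1:
--             prev = a
--         else:
--             runs.append((s, prev))
--             s = prev = a
--     runs.append((s, prev))
--     # pass 2: chunk each run into pieces of at most max_len
--     out = []
--     for (s, e) in runs:
--         if max_len <= 1:
--             out.extend((a, a) for a in range(s, e + 1))
--         else:
--             c = s
--             while c + max_len - 1 < e:
--                 out.append((c, c + max_len - 1))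
--                 c += max_len
--             out.append((c, e))
--     return out
-- ===== Notes on version B (the rewrite author's own statement) =====
-- stated objective: alternative
-- what changed: Replaces A's single fold that merges addresses into bounded ranges on the fly with a two-pass decomposition: first group the sorted addresses into maximal consecutive runs, then chunk each run into pieces of at most max_len (singletons when max_len <= 1).
import Mathlib
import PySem

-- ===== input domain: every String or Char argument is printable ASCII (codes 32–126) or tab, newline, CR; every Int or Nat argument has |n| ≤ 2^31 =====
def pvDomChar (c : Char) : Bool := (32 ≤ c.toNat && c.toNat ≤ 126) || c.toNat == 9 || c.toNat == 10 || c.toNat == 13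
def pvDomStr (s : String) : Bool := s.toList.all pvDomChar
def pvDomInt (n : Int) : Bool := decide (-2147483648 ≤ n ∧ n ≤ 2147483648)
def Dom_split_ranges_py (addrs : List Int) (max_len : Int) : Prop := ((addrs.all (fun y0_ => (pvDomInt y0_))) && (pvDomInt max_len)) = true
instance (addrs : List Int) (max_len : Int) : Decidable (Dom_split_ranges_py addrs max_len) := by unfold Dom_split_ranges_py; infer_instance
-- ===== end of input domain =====

-- B replaces A's single bound-aware merge loop by two passes (maximal consecutive runs, then
-- chunking each run to length ≤ max_len): an alternative decomposition of the same cost.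

-- ===== PORT A =====
-- one loop step of A: state (out, s, prev), extend the current range or flush it
def pvStepA (max_len : Int) (st : List (Int × Int) × Int × Int) (a : Int) : List (Int × Int) × Int × Int :=
  if a = st.2.2 + 1 ∧ a - st.2.1 + 1 ≤ max_len then (st.1, st.2.1, a)
  else (st.1 ++ [(st.2.1, st.2.2)], a, a)

-- body of A after sorting (s = addrs[0]; loop over addrs[1:]; final append)
def pvAfterA (xs : List Int) (max_len : Int) : List (Int × Int) :=
  match xs with
  | [] => []
  | a0 :: rest =>
    let st := rest.foldl (pvStepA max_len) ([], a0, a0)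
    st.1 ++ [(st.2.1, st.2.2)]

def split_ranges_py (addrs : List Int) (max_len : Int) : List (Int × Int) :=
  if addrs = [] then []
  else pvAfterA (PySem.List.sorted addrs (fun x => x) false) max_len

-- ===== PORT B =====
-- pass 1 of B: maximal runs of consecutive integers (the for-loop with state (runs, s, prev))
def pvRuns (xs : List Int) (s prev : Int) : List (Int × Int) :=
  match xs with
  | [] => [(s, prev)]
  | a :: ys => if a = prev + 1 then pvRuns ys s a else (s, prev) :: pvRuns ys a a

-- pass 2 inner while-loop of B: chunk run [c, e] into pieces of length max_len
-- (the '2 ≤ m' conjunct only makes the recursion total; B only calls it with max_len > 1)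
def pvChunk (c e m : Int) : List (Int × Int) :=
  if h : 2 ≤ m ∧ c + m - 1 < e then (c, c + m - 1) :: pvChunk (c + m) e m else [(c, e)]
termination_by (e - c).toNat
decreasing_by omega

-- pass 2 body of B for one run
def pvPiece (m : Int) (p : Int × Int) : List (Int × Int) :=
  if m ≤ 1 then (PySem.List.pyRange p.1 (p.2 + 1) 1).map (fun a => (a, a))
  else pvChunk p.1 p.2 m

def split_ranges_py_alt (addrs : List Int) (max_len : Int) : List (Int × Int) :=
  match PySem.List.sorted addrs (fun x => x) false with
  | [] => []
  | a0 :: rest => (pvRuns rest a0 a0).flatMap (pvPiece max_len)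

-- ===== PRECONDITION & SPEC =====
def Spec_split_ranges_py (addrs : List Int) (max_len : Int) (out : List (Int × Int)) : Prop := out = split_ranges_py_alt addrs max_len
instance (addrs : List Int) (max_len : Int) (out : List (Int × Int)) : Decidable (Spec_split_ranges_py addrs max_len out) := by unfold Spec_split_ranges_py; infer_instance

-- ===== CLAIM (what is proved, stated in full; the proofs are below) =====
def Claim_equal_split_ranges_py : Prop := ∀ (addrs : List Int) (max_len : Int), Dom_split_ranges_py addrs max_len → Spec_split_ranges_py addrs max_len (split_ranges_py addrs max_len)

-- ===== LEMMAS AND PROOFS =====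

-- A's loop, without the output accumulator
def pvAcore (m : Int) : List Int → Int → Int → List (Int × Int)
  | [], s, prev => [(s, prev)]
  | a :: ys, s, prev =>
    if a = prev + 1 ∧ a - s + 1 ≤ m then pvAcore m ys s a
    else (s, prev) :: pvAcore m ys a a

theorem pvFoldA_eq (m : Int) : ∀ (ys : List Int) (out : List (Int × Int)) (s prev : Int),
    (let st := ys.foldl (pvStepA m) (out, s, prev); st.1 ++ [(st.2.1, st.2.2)]) = out ++ pvAcore m ys s prev := by
  intro ys
  induction ys with
  | nil => intro out s prev; simp [pvAcore]
  | cons a ys ih =>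
    intro out s prev
    simp only [List.foldl_cons, pvStepA, pvAcore]
    by_cases h : a = prev + 1 ∧ a - s + 1 ≤ m
    · simp only [if_pos h]; exact ih out s a
    · simp only [if_neg h]; rw [ih]; simp

-- end of the run that the state (·, prev) is in
def pvRunEnd : List Int → Int → Int
  | [], prev => prev
  | a :: ys, prev => if a = prev + 1 then pvRunEnd ys a else prev

-- the runs after the current one
def pvRunRest : List Int → Int → List (Int × Int)
  | [], _ => []
  | a :: ys, prev => if a = prev + 1 then pvRunRest ys a else (a, pvRunEnd ys a) :: pvRunRest ys a

theorem pvRuns_decomp : ∀ (ys : List Int) (s prev : Int),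
    pvRuns ys s prev = (s, pvRunEnd ys prev) :: pvRunRest ys prev := by
  intro ys
  induction ys with
  | nil => intro s prev; simp [pvRuns, pvRunEnd, pvRunRest]
  | cons a ys ih =>
    intro s prev
    simp only [pvRuns, pvRunEnd, pvRunRest]
    by_cases h : a = prev + 1
    · simp only [if_pos h]; exact ih s a
    · simp only [if_neg h]; rw [ih a a]

theorem pvRunEnd_ge : ∀ (ys : List Int) (prev : Int), prev ≤ pvRunEnd ys prev := by
  intro ys
  induction ys with
  | nil => intro prev; simp [pvRunEnd]
  | cons a ys ih =>
    intro prev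
    simp only [pvRunEnd]
    by_cases h : a = prev + 1
    · simp only [if_pos h]; have := ih a; omega
    · simp only [if_neg h]; omega

-- m ≥ 2: A's loop equals chunking of the runs, chunk cursor c, run position prev
theorem pvMain_ge2 (m : Int) (hm : 2 ≤ m) : ∀ (ys : List Int) (c prev : Int),
    c ≤ prev → prev - c + 1 ≤ m →
    pvAcore m ys c prev = pvChunk c (pvRunEnd ys prev) m ++ (pvRunRest ys prev).flatMap (pvPiece m) := by
  intro ys
  induction ys with
  | nil =>
    intro c prev h1 h2
    simp only [pvAcore, pvRunEnd, pvRunRest, List.flatMap_nil, List.append_nil]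
    rw [pvChunk]
    rw [dif_neg (by omega : ¬ (2 ≤ m ∧ c + m - 1 < prev))]
  | cons a ys ih =>
    intro c prev h1 h2
    simp only [pvAcore, pvRunEnd, pvRunRest]
    by_cases ha : a = prev + 1
    · by_cases hb : a - c + 1 ≤ m
      · simp only [if_pos ha, if_pos (And.intro ha hb)]
        exact ih c a (by omega) (by omega)
      · simp only [if_pos ha, if_neg (show ¬ (a = prev + 1 ∧ a - c + 1 ≤ m) from fun hh => hb hh.2)]
        have hprev : prev = c + m - 1 := by omega
        have ha' : a = c + m := by omega
        have he : a ≤ pvRunEnd ys a := pvRunEnd_ge ys a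
        rw [pvChunk]
        rw [dif_pos (And.intro hm (by omega : c + m - 1 < pvRunEnd ys a))]
        rw [ih a a (le_refl a) (by omega)]
        simp [hprev, ha']
    · simp only [if_neg ha, if_neg (fun (h : a = prev + 1 ∧ _) => ha h.1)]
      rw [pvChunk]
      rw [dif_neg (by omega : ¬ (2 ≤ m ∧ c + m - 1 < prev))]
      rw [ih a a (le_refl a) (by omega)]
      simp only [List.flatMap_cons, List.cons_append]
      congr 1
      simp [pvPiece, if_neg (by omega : ¬ m ≤ 1)]

-- m ≤ 1: A's loop emits a singleton per element
theorem pvAcore_le1 (m : Int) (hm : m ≤ 1) : ∀ (ys : List Int) (prev : Int),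
    pvAcore m ys prev prev = (prev :: ys).map (fun a => (a, a)) := by
  intro ys
  induction ys with
  | nil => intro prev; simp [pvAcore]
  | cons a ys ih =>
    intro prev
    simp only [pvAcore]
    have : ¬ (a = prev + 1 ∧ a - prev + 1 ≤ m) := by rintro ⟨h1, h2⟩; omega
    simp only [if_neg this, List.map_cons]
    rw [ih a]
    simp

-- m ≤ 1: B emits a singleton per element of each run
theorem pvFlat_le1 (m : Int) (hm : m ≤ 1) : ∀ (ys : List Int) (s prev : Int), s ≤ prev →
    (pvRuns ys s prev).flatMap (pvPiece m)
      = (PySem.List.pyRange s (prev + 1) 1).map (fun a => (a, a)) ++ ys.map (fun a => (a, a)) := by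
  intro ys
  induction ys with
  | nil => intro s prev h; simp [pvRuns, pvPiece, if_pos hm]
  | cons a ys ih =>
    intro s prev h
    simp only [pvRuns]
    by_cases ha : a = prev + 1
    · simp only [if_pos ha]
      rw [ih s a (by omega)]
      have : PySem.List.pyRange s (a + 1) 1 = PySem.List.pyRange s (prev + 1) 1 ++ [prev + 1] := by
        subst ha
        rw [PySem.List.pyRange_one_succ_right (by omega)]
      rw [this]
      simp [ha]
    · simp only [if_neg ha, List.flatMap_cons]
      rw [ih a a (le_refl a)]
      have h1 : PySem.List.pyRange a (a + 1) 1 = [a] := by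
        rw [PySem.List.pyRange_one_cons (by omega)]
        simp
      simp only [pvPiece, if_pos hm, h1]
      simp

theorem pvAfter_eq (xs : List Int) (m : Int) :
    pvAfterA xs m = (match xs with
      | [] => ([] : List (Int × Int))
      | a0 :: rest => (pvRuns rest a0 a0).flatMap (pvPiece m)) := by
  match xs with
  | [] => rfl
  | a0 :: rest =>
    simp only [pvAfterA]
    rw [pvFoldA_eq m rest [] a0 a0, List.nil_append]
    by_cases hm : m ≤ 1
    · rw [pvAcore_le1 m hm, pvFlat_le1 m hm rest a0 a0 (le_refl a0)]
      have h1 : PySem.List.pyRange a0 (a0 + 1) 1 = [a0] := by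
        rw [PySem.List.pyRange_one_cons (by omega)]
        simp
      simp [h1]
    · rw [pvMain_ge2 m (by omega) rest a0 a0 (le_refl a0) (by omega)]
      rw [pvRuns_decomp]
      simp only [List.flatMap_cons]
      congr 1
      simp [pvPiece, if_neg hm]

theorem pvSorted_nil : PySem.List.sorted ([] : List Int) (fun x => x) false = [] := by
  have := PySem.List.sorted_perm ([] : List Int) (fun x => x) false
  exact List.Perm.eq_nil this

-- ===== VERDICT (by name: the statement is the Claim_ definition above) =====
theorem split_ranges_py_spec : Claim_equal_split_ranges_py := by
  intro addrs m _
  unfold Spec_split_ranges_py split_ranges_py split_ranges_py_alt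
  by_cases h : addrs = []
  · subst h
    rw [pvSorted_nil]
    simp
  · rw [if_neg h, pvAfter_eq]
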